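-- pv_equiv track=rewrite | github.com/KSler/phi_prediction | classic_feature_gen/protein_feature.py | physical_chemical_feature
-- ===== SOURCE A (Python) =====
-- from collections import Counter
--
-- def physical_chemical_feature(sequence):
--     seq_new = sequence.replace('*', '').replace('X','').replace('U','').replace('B','').replace('Z','').replace('J','')
--
--     CE = 'CHONS'
--     Chemi_stats = {
--         'A': {'C': 3, 'H': 7, 'O': 2, 'N': 1, 'S': 0},
--         'C': {'C': 3, 'H': 7, 'O': 2, 'N': 1, 'S': 1},
--         'D': {'C': 4, 'H': 7, 'O': 4, 'N': 1, 'S': 0},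
--         'E': {'C': 5, 'H': 9, 'O': 4, 'N': 1, 'S': 0},
--         'F': {'C': 9, 'H': 11, 'O': 2, 'N': 1, 'S': 0},
--         'G': {'C': 2, 'H': 5, 'O': 2, 'N': 1, 'S': 0},
--         'H': {'C': 6, 'H': 9, 'O': 2, 'N': 3, 'S': 0},
--         'I': {'C': 6, 'H': 13, 'O': 2, 'N': 1, 'S': 0},
--         'K': {'C': 6, 'H': 14, 'O': 2, 'N': 2, 'S': 0},
--         'L': {'C': 6, 'H': 13, 'O': 2, 'N': 1, 'S': 0},
--         'M': {'C': 5, 'H': 11, 'O': 2, 'N': 1, 'S': 1},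
--         'N': {'C': 4, 'H': 8, 'O': 3, 'N': 2, 'S': 0},
--         'P': {'C': 5, 'H': 9, 'O': 2, 'N': 1, 'S': 0},
--         'Q': {'C': 5, 'H': 10, 'O': 3, 'N': 2, 'S': 0},
--         'R': {'C': 6, 'H': 14, 'O': 2, 'N': 4, 'S': 0},
--         'S': {'C': 3, 'H': 7, 'O': 3, 'N': 1, 'S': 0},
--         'T': {'C': 4, 'H': 9, 'O': 3, 'N': 1, 'S': 0},
--         'V': {'C': 5, 'H': 11, 'O': 2, 'N': 1, 'S': 0},
--         'W': {'C': 11, 'H': 12, 'O': 2, 'N': 2, 'S': 0},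
--         'Y': {'C': 9, 'H': 11, 'O': 3, 'N': 1, 'S': 0}
--     }
--     count = Counter(seq_new)
--     return [
--         sum(Chemi_stats[aa][c] * count.get(aa, 0) for aa in count if aa in Chemi_stats)
--         for c in CE
--     ]
-- ===== SOURCE B (Python) =====
-- def physical_chemical_feature(sequence):
--     Chemi_stats = {
--         'A': (3, 7, 2, 1, 0),
--         'C': (3, 7, 2, 1, 1),
--         'D': (4, 7, 4, 1, 0),
--         'E': (5, 9, 4, 1, 0),
--         'F': (9, 11, 2, 1, 0),
--         'G': (2, 5, 2, 1, 0),
--         'H': (6, 9, 2, 3, 0),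
--         'I': (6, 13, 2, 1, 0),
--         'K': (6, 14, 2, 2, 0),
--         'L': (6, 13, 2, 1, 0),
--         'M': (5, 11, 2, 1, 1),
--         'N': (4, 8, 3, 2, 0),
--         'P': (5, 9, 2, 1, 0),
--         'Q': (5, 10, 3, 2, 0),
--         'R': (6, 14, 2, 4, 0),
--         'S': (3, 7, 3, 1, 0),
--         'T': (4, 9, 3, 1, 0),
--         'V': (5, 11, 2, 1, 0),
--         'W': (11, 12, 2, 2, 0),
--         'Y': (9, 11, 3, 1, 0),
--     }
--     c = h = o = n = s = 0
--     for aa in sequence: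
--         t = Chemi_stats.get(aa)
--         if t is not None:
--             c += t[0]; h += t[1]; o += t[2]; n += t[3]; s += t[4]
--     return [c, h, o, n, s]
-- ===== Notes on version B (the rewrite author's own statement) =====
-- stated objective: simpler
-- what changed: Replaced the replace-chain + Counter frequency table + per-element generator-sum over counter keys by a single streaming pass over the raw sequence that adds each residue's five element counts into five running accumulators (unknown residues simply skipped).
import Mathlib
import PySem

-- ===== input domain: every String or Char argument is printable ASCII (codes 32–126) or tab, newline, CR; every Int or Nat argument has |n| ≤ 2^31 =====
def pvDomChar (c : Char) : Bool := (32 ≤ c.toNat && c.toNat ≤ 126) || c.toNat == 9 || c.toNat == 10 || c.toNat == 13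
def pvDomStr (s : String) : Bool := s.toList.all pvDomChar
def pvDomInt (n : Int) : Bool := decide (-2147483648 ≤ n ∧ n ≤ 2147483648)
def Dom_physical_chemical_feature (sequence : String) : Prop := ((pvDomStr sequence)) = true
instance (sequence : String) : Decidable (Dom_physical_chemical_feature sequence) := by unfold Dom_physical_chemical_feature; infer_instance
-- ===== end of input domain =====

-- B replaces A's replace-chain + Counter + per-element aggregation over counter keys
-- by one streaming pass over the raw sequence with five running accumulators (simpler, single pass).


-- ===== PORT A =====
def pvChemiStats : PySem.Dict Char (PySem.Dict Char Int) := PySem.Dict.ofList [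
  ('A', PySem.Dict.ofList [('C', 3), ('H', 7), ('O', 2), ('N', 1), ('S', 0)]),
  ('C', PySem.Dict.ofList [('C', 3), ('H', 7), ('O', 2), ('N', 1), ('S', 1)]),
  ('D', PySem.Dict.ofList [('C', 4), ('H', 7), ('O', 4), ('N', 1), ('S', 0)]),
  ('E', PySem.Dict.ofList [('C', 5), ('H', 9), ('O', 4), ('N', 1), ('S', 0)]),
  ('F', PySem.Dict.ofList [('C', 9), ('H', 11), ('O', 2), ('N', 1), ('S', 0)]),
  ('G', PySem.Dict.ofList [('C', 2), ('H', 5), ('O', 2), ('N', 1), ('S', 0)]),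
  ('H', PySem.Dict.ofList [('C', 6), ('H', 9), ('O', 2), ('N', 3), ('S', 0)]),
  ('I', PySem.Dict.ofList [('C', 6), ('H', 13), ('O', 2), ('N', 1), ('S', 0)]),
  ('K', PySem.Dict.ofList [('C', 6), ('H', 14), ('O', 2), ('N', 2), ('S', 0)]),
  ('L', PySem.Dict.ofList [('C', 6), ('H', 13), ('O', 2), ('N', 1), ('S', 0)]),
  ('M', PySem.Dict.ofList [('C', 5), ('H', 11), ('O', 2), ('N', 1), ('S', 1)]),
  ('N', PySem.Dict.ofList [('C', 4), ('H', 8), ('O', 3), ('N', 2), ('S', 0)]),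
  ('P', PySem.Dict.ofList [('C', 5), ('H', 9), ('O', 2), ('N', 1), ('S', 0)]),
  ('Q', PySem.Dict.ofList [('C', 5), ('H', 10), ('O', 3), ('N', 2), ('S', 0)]),
  ('R', PySem.Dict.ofList [('C', 6), ('H', 14), ('O', 2), ('N', 4), ('S', 0)]),
  ('S', PySem.Dict.ofList [('C', 3), ('H', 7), ('O', 3), ('N', 1), ('S', 0)]),
  ('T', PySem.Dict.ofList [('C', 4), ('H', 9), ('O', 3), ('N', 1), ('S', 0)]),
  ('V', PySem.Dict.ofList [('C', 5), ('H', 11), ('O', 2), ('N', 1), ('S', 0)]),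
  ('W', PySem.Dict.ofList [('C', 11), ('H', 12), ('O', 2), ('N', 2), ('S', 0)]),
  ('Y', PySem.Dict.ofList [('C', 9), ('H', 11), ('O', 3), ('N', 1), ('S', 0)])]

def physical_chemical_feature (sequence : String) : List Int :=
  let seq_new :=
    PySem.Str.replace (PySem.Str.replace (PySem.Str.replace (PySem.Str.replace
      (PySem.Str.replace (PySem.Str.replace sequence "*" "") "X" "") "U" "") "B" "") "Z" "") "J" ""
  let count := PySem.Dict.counter seq_new.toList
  ("CHONS".toList).map (fun c =>
    ((count.keys.filter (fun aa => pvChemiStats.contains aa)).map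
      (fun aa => (pvChemiStats.getD aa PySem.Dict.empty).getD c 0 * count.getD aa 0)).sum)

-- ===== PORT B =====
def pvChemiStatsB : PySem.Dict Char (Int × Int × Int × Int × Int) := PySem.Dict.ofList [
  ('A', (3, 7, 2, 1, 0)), ('C', (3, 7, 2, 1, 1)), ('D', (4, 7, 4, 1, 0)), ('E', (5, 9, 4, 1, 0)),
  ('F', (9, 11, 2, 1, 0)), ('G', (2, 5, 2, 1, 0)), ('H', (6, 9, 2, 3, 0)), ('I', (6, 13, 2, 1, 0)),
  ('K', (6, 14, 2, 2, 0)), ('L', (6, 13, 2, 1, 0)), ('M', (5, 11, 2, 1, 1)), ('N', (4, 8, 3, 2, 0)),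
  ('P', (5, 9, 2, 1, 0)), ('Q', (5, 10, 3, 2, 0)), ('R', (6, 14, 2, 4, 0)), ('S', (3, 7, 3, 1, 0)),
  ('T', (4, 9, 3, 1, 0)), ('V', (5, 11, 2, 1, 0)), ('W', (11, 12, 2, 2, 0)), ('Y', (9, 11, 3, 1, 0))]

def physical_chemical_feature_alt (sequence : String) : List Int :=
  let r := sequence.toList.foldl (fun acc aa =>
    match pvChemiStatsB.get? aa with
    | none => acc
    | some t => (acc.1 + t.1, acc.2.1 + t.2.1, acc.2.2.1 + t.2.2.1,
                 acc.2.2.2.1 + t.2.2.2.1, acc.2.2.2.2 + t.2.2.2.2))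
    ((0 : Int), (0 : Int), (0 : Int), (0 : Int), (0 : Int))
  [r.1, r.2.1, r.2.2.1, r.2.2.2.1, r.2.2.2.2]

-- ===== PRECONDITION & SPEC =====
def Spec_physical_chemical_feature (sequence : String) (out : List Int) : Prop := out = physical_chemical_feature_alt sequence
instance (sequence : String) (out : List Int) : Decidable (Spec_physical_chemical_feature sequence out) := by unfold Spec_physical_chemical_feature; infer_instance

-- ===== CLAIM (what is proved, stated in full; the proofs are below) =====
def Claim_equal_physical_chemical_feature : Prop := ∀ (sequence : String), Dom_physical_chemical_feature sequence → Spec_physical_chemical_feature sequence (physical_chemical_feature sequence)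

-- ===== LEMMAS AND PROOFS =====

-- replace with a single-char pattern and empty replacement is a filter
theorem pv_replace_go_single (c : Char) : ∀ (fuel : Nat) (l acc : List Char),
    PySem.Chars.replace.go [c] [] fuel l acc
      = acc.reverse ++ (l.take fuel).filter (· ≠ c) ++ l.drop fuel := by
  intro fuel
  induction fuel with
  | zero => intro l acc; cases l <;> simp [PySem.Chars.replace.go]
  | succ n ih =>
    intro l acc
    cases l with
    | nil => simp [PySem.Chars.replace.go.eq_def]
    | cons x t =>
      by_cases h : x = c
      · subst h
        simpa [PySem.Chars.replace.go, List.isPrefixOf] using ih t acc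
      · simp [PySem.Chars.replace.go, List.isPrefixOf, h, ih t (x :: acc)]
        intro hc; exact absurd hc.symm h

theorem pv_replace_single (l : List Char) (c : Char) :
    PySem.Chars.replace l [c] [] = l.filter (· ≠ c) := by
  simpa using pv_replace_go_single c l.length l []

-- indicator sum over a Nodup key list
theorem pv_indicator_sum (f : Char → Int) (p : Char → Bool) (x : Char) :
    ∀ (ks : List Char), ks.Nodup →
      ((ks.filter p).map (fun k => if k = x then f k else 0)).sum
        = if p x ∧ x ∈ ks then f x else 0 := by
  intro ks
  induction ks with
  | nil => simp
  | cons k rest ih =>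
    intro hnd
    obtain ⟨hkr, hnd'⟩ := List.nodup_cons.mp hnd
    by_cases hk : k = x
    · subst hk
      by_cases hp : p k = true <;> simp [List.filter, hp, ih hnd', hkr]
    · have hne : x ≠ k := fun h => hk h.symm
      by_cases hp : p k = true <;>
        by_cases hx : p x = true ∧ x ∈ rest <;>
          simp [List.filter, hp, ih hnd', hk, hne, hx]

-- the aggregation over counter keys is a plain indicator sum over the counted list
theorem pv_counter_sum (f : Char → Int) (p : Char → Bool) (l : List Char) :
    ∀ (ks : List Char), ks.Nodup →
      ((ks.filter p).map (fun k => f k * (l.count k : Int))).sum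
        = (l.map (fun x => if p x ∧ x ∈ ks then f x else 0)).sum := by
  induction l with
  | nil => simp
  | cons x t ih =>
    intro ks hnd
    have key : ((ks.filter p).map (fun k => f k * ((x :: t).count k : Int))).sum
        = ((ks.filter p).map (fun k => f k * (t.count k : Int))).sum
          + ((ks.filter p).map (fun k => if k = x then f k else 0)).sum := by
      rw [← List.sum_map_add]
      congr 1
      apply List.map_congr_left
      intro k hk
      by_cases hkx : k = x
      · subst hkx; simp [List.count_cons]; ring
      · simp [List.count_cons, hkx]
        exact Or.inl fun h => hkx h.symm
    rw [key, ih ks hnd, pv_indicator_sum f p x ks hnd]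
    simp [add_comm]

-- sum over a filter is unchanged when the function vanishes off the filter
theorem pv_sum_filter_inv (h : Char → Int) (q : Char → Bool)
    (hq : ∀ x, q x = false → h x = 0) (l : List Char) :
    ((l.filter q).map h).sum = (l.map h).sum := by
  induction l with
  | nil => rfl
  | cons x t ih =>
    by_cases hx : q x = true
    · simp [List.filter, hx, ih]
    · have hx' : q x = false := by revert hx; cases q x <;> simp
      simp [List.filter, hx', ih, hq x hx']

-- A's per-residue contribution for one chemical element
def pvHA (ch : Char) : Char → Int := fun x =>
  if pvChemiStats.contains x then (pvChemiStats.getD x PySem.Dict.empty).getD ch 0 else 0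

-- B's per-residue contributions (the five tuple components)
def pvFB1 : Char → Int := fun x => match pvChemiStatsB.get? x with | none => 0 | some t => t.1
def pvFB2 : Char → Int := fun x => match pvChemiStatsB.get? x with | none => 0 | some t => t.2.1
def pvFB3 : Char → Int := fun x => match pvChemiStatsB.get? x with | none => 0 | some t => t.2.2.1
def pvFB4 : Char → Int := fun x => match pvChemiStatsB.get? x with | none => 0 | some t => t.2.2.2.1
def pvFB5 : Char → Int := fun x => match pvChemiStatsB.get? x with | none => 0 | some t => t.2.2.2.2

-- B's fold accumulates the five component sums
theorem pv_fold5 (l : List Char) : ∀ (a b c d e : Int),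
    l.foldl (fun acc aa =>
      match pvChemiStatsB.get? aa with
      | none => acc
      | some t => (acc.1 + t.1, acc.2.1 + t.2.1, acc.2.2.1 + t.2.2.1,
                   acc.2.2.2.1 + t.2.2.2.1, acc.2.2.2.2 + t.2.2.2.2)) (a, b, c, d, e)
      = (a + (l.map pvFB1).sum, b + (l.map pvFB2).sum, c + (l.map pvFB3).sum,
         d + (l.map pvFB4).sum, e + (l.map pvFB5).sum) := by
  induction l with
  | nil => intro a b c d e; simp
  | cons x t ih =>
    intro a b c d e
    cases hx : pvChemiStatsB.get? x <;>
      simp [List.foldl_cons, hx, ih, pvFB1, pvFB2, pvFB3, pvFB4, pvFB5, add_assoc]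

-- A's aggregation over the counter of m is the plain sum of pvHA over m
theorem pv_A_entry (ch : Char) (m : List Char) :
    (((PySem.Dict.counter m).keys.filter (fun aa => pvChemiStats.contains aa)).map
      (fun aa => (pvChemiStats.getD aa PySem.Dict.empty).getD ch 0
                  * (PySem.Dict.counter m).getD aa 0)).sum
      = (m.map (pvHA ch)).sum := by
  rw [PySem.Dict.keys_counter]
  have hc : (((PySem.Set.ofList m).filter (fun aa => pvChemiStats.contains aa)).map
      (fun aa => (pvChemiStats.getD aa PySem.Dict.empty).getD ch 0
                  * (PySem.Dict.counter m).getD aa 0)).sum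
      = (((PySem.Set.ofList m).filter (fun aa => pvChemiStats.contains aa)).map
      (fun aa => (pvChemiStats.getD aa PySem.Dict.empty).getD ch 0 * (m.count aa : Int))).sum := by
    congr 1
    apply List.map_congr_left
    intro k _
    rw [PySem.Dict.getD_counter]
  rw [hc, pv_counter_sum (fun aa => (pvChemiStats.getD aa PySem.Dict.empty).getD ch 0)
        (fun aa => pvChemiStats.contains aa) m (PySem.Set.ofList m) (PySem.Set.nodup_ofList m)]
  congr 1
  apply List.map_congr_left
  intro x hx
  simp [pvHA, PySem.Set.mem_ofList, hx]

-- the literal tables as raw association lists (ofList with distinct keys computes to mk)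
theorem pv_statsA_mk : pvChemiStats = PySem.Dict.mk [
    ('A', PySem.Dict.mk [('C', 3), ('H', 7), ('O', 2), ('N', 1), ('S', 0)]),
    ('C', PySem.Dict.mk [('C', 3), ('H', 7), ('O', 2), ('N', 1), ('S', 1)]),
    ('D', PySem.Dict.mk [('C', 4), ('H', 7), ('O', 4), ('N', 1), ('S', 0)]),
    ('E', PySem.Dict.mk [('C', 5), ('H', 9), ('O', 4), ('N', 1), ('S', 0)]),
    ('F', PySem.Dict.mk [('C', 9), ('H', 11), ('O', 2), ('N', 1), ('S', 0)]),
    ('G', PySem.Dict.mk [('C', 2), ('H', 5), ('O', 2), ('N', 1), ('S', 0)]),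
    ('H', PySem.Dict.mk [('C', 6), ('H', 9), ('O', 2), ('N', 3), ('S', 0)]),
    ('I', PySem.Dict.mk [('C', 6), ('H', 13), ('O', 2), ('N', 1), ('S', 0)]),
    ('K', PySem.Dict.mk [('C', 6), ('H', 14), ('O', 2), ('N', 2), ('S', 0)]),
    ('L', PySem.Dict.mk [('C', 6), ('H', 13), ('O', 2), ('N', 1), ('S', 0)]),
    ('M', PySem.Dict.mk [('C', 5), ('H', 11), ('O', 2), ('N', 1), ('S', 1)]),
    ('N', PySem.Dict.mk [('C', 4), ('H', 8), ('O', 3), ('N', 2), ('S', 0)]),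
    ('P', PySem.Dict.mk [('C', 5), ('H', 9), ('O', 2), ('N', 1), ('S', 0)]),
    ('Q', PySem.Dict.mk [('C', 5), ('H', 10), ('O', 3), ('N', 2), ('S', 0)]),
    ('R', PySem.Dict.mk [('C', 6), ('H', 14), ('O', 2), ('N', 4), ('S', 0)]),
    ('S', PySem.Dict.mk [('C', 3), ('H', 7), ('O', 3), ('N', 1), ('S', 0)]),
    ('T', PySem.Dict.mk [('C', 4), ('H', 9), ('O', 3), ('N', 1), ('S', 0)]),
    ('V', PySem.Dict.mk [('C', 5), ('H', 11), ('O', 2), ('N', 1), ('S', 0)]),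
    ('W', PySem.Dict.mk [('C', 11), ('H', 12), ('O', 2), ('N', 2), ('S', 0)]),
    ('Y', PySem.Dict.mk [('C', 9), ('H', 11), ('O', 3), ('N', 1), ('S', 0)])] := by rfl

theorem pv_statsB_mk : pvChemiStatsB = PySem.Dict.mk [('A', (3, 7, 2, 1, 0)), ('C', (3, 7, 2, 1, 1)), ('D', (4, 7, 4, 1, 0)), ('E', (5, 9, 4, 1, 0)), ('F', (9, 11, 2, 1, 0)), ('G', (2, 5, 2, 1, 0)), ('H', (6, 9, 2, 3, 0)), ('I', (6, 13, 2, 1, 0)), ('K', (6, 14, 2, 2, 0)), ('L', (6, 13, 2, 1, 0)), ('M', (5, 11, 2, 1, 1)), ('N', (4, 8, 3, 2, 0)), ('P', (5, 9, 2, 1, 0)), ('Q', (5, 10, 3, 2, 0)), ('R', (6, 14, 2, 4, 0)), ('S', (3, 7, 3, 1, 0)), ('T', (4, 9, 3, 1, 0)), ('V', (5, 11, 2, 1, 0)), ('W', (11, 12, 2, 2, 0)), ('Y', (9, 11, 3, 1, 0))] := by rfl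

theorem pv_pt1 (x : Char) : pvHA 'C' x = pvFB1 x := by
  by_cases h : x ∈ ['A','C','D','E','F','G','H','I','K','L','M','N','P','Q','R','S','T','V','W','Y']
  · fin_cases h <;> decide
  · have hA : pvChemiStats.contains x = false := by
      rw [pv_statsA_mk, PySem.Dict.contains_eq_decide_mem_keys]
      simp only [PySem.Dict.keys_mk, List.map_cons, List.map_nil] at *
      simpa using h
    have hB : pvChemiStatsB.get? x = none := by
      rw [pv_statsB_mk, PySem.Dict.get?_eq_none_iff_not_mem_keys]
      simp only [PySem.Dict.keys_mk, List.map_cons, List.map_nil] at *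
      simpa using h
    simp [pvHA, pvFB1, hA, hB]

theorem pv_pt2 (x : Char) : pvHA 'H' x = pvFB2 x := by
  by_cases h : x ∈ ['A','C','D','E','F','G','H','I','K','L','M','N','P','Q','R','S','T','V','W','Y']
  · fin_cases h <;> decide
  · have hA : pvChemiStats.contains x = false := by
      rw [pv_statsA_mk, PySem.Dict.contains_eq_decide_mem_keys]
      simp only [PySem.Dict.keys_mk, List.map_cons, List.map_nil] at *
      simpa using h
    have hB : pvChemiStatsB.get? x = none := by
      rw [pv_statsB_mk, PySem.Dict.get?_eq_none_iff_not_mem_keys]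
      simp only [PySem.Dict.keys_mk, List.map_cons, List.map_nil] at *
      simpa using h
    simp [pvHA, pvFB2, hA, hB]

theorem pv_pt3 (x : Char) : pvHA 'O' x = pvFB3 x := by
  by_cases h : x ∈ ['A','C','D','E','F','G','H','I','K','L','M','N','P','Q','R','S','T','V','W','Y']
  · fin_cases h <;> decide
  · have hA : pvChemiStats.contains x = false := by
      rw [pv_statsA_mk, PySem.Dict.contains_eq_decide_mem_keys]
      simp only [PySem.Dict.keys_mk, List.map_cons, List.map_nil] at *
      simpa using h
    have hB : pvChemiStatsB.get? x = none := by
      rw [pv_statsB_mk, PySem.Dict.get?_eq_none_iff_not_mem_keys]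
      simp only [PySem.Dict.keys_mk, List.map_cons, List.map_nil] at *
      simpa using h
    simp [pvHA, pvFB3, hA, hB]

theorem pv_pt4 (x : Char) : pvHA 'N' x = pvFB4 x := by
  by_cases h : x ∈ ['A','C','D','E','F','G','H','I','K','L','M','N','P','Q','R','S','T','V','W','Y']
  · fin_cases h <;> decide
  · have hA : pvChemiStats.contains x = false := by
      rw [pv_statsA_mk, PySem.Dict.contains_eq_decide_mem_keys]
      simp only [PySem.Dict.keys_mk, List.map_cons, List.map_nil] at *
      simpa using h
    have hB : pvChemiStatsB.get? x = none := by
      rw [pv_statsB_mk, PySem.Dict.get?_eq_none_iff_not_mem_keys]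
      simp only [PySem.Dict.keys_mk, List.map_cons, List.map_nil] at *
      simpa using h
    simp [pvHA, pvFB4, hA, hB]

theorem pv_pt5 (x : Char) : pvHA 'S' x = pvFB5 x := by
  by_cases h : x ∈ ['A','C','D','E','F','G','H','I','K','L','M','N','P','Q','R','S','T','V','W','Y']
  · fin_cases h <;> decide
  · have hA : pvChemiStats.contains x = false := by
      rw [pv_statsA_mk, PySem.Dict.contains_eq_decide_mem_keys]
      simp only [PySem.Dict.keys_mk, List.map_cons, List.map_nil] at *
      simpa using h
    have hB : pvChemiStatsB.get? x = none := by
      rw [pv_statsB_mk, PySem.Dict.get?_eq_none_iff_not_mem_keys]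
      simp only [PySem.Dict.keys_mk, List.map_cons, List.map_nil] at *
      simpa using h
    simp [pvHA, pvFB5, hA, hB]

-- ===== VERDICT (by name: the statement is the Claim_ definition above) =====
theorem physical_chemical_feature_spec : Claim_equal_physical_chemical_feature := by
  intro s _
  show physical_chemical_feature s = physical_chemical_feature_alt s
  rw [physical_chemical_feature, physical_chemical_feature_alt]
  rw [pv_fold5]
  have hstar : ("*" : String).toList = ['*'] := rfl
  have hX : ("X" : String).toList = ['X'] := rfl
  have hU : ("U" : String).toList = ['U'] := rfl
  have hB : ("B" : String).toList = ['B'] := rfl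
  have hZ : ("Z" : String).toList = ['Z'] := rfl
  have hJ : ("J" : String).toList = ['J'] := rfl
  have hE : ("" : String).toList = [] := rfl
  have hCHONS : ("CHONS" : String).toList = ['C', 'H', 'O', 'N', 'S'] := rfl
  simp only [PySem.Str.toList_replace, hstar, hX, hU, hB, hZ, hJ, hE, hCHONS,
    pv_replace_single, List.map_cons, List.map_nil, zero_add]
  have key : ∀ ch : Char, ∀ fb : Char → Int, (∀ x, pvHA ch x = fb x) →
      (((PySem.Dict.counter ((((((s.toList.filter (· ≠ '*')).filter (· ≠ 'X')).filter
          (· ≠ 'U')).filter (· ≠ 'B')).filter (· ≠ 'Z')).filter (· ≠ 'J'))).keys.filter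
            (fun aa => pvChemiStats.contains aa)).map
        (fun aa => (pvChemiStats.getD aa PySem.Dict.empty).getD ch 0
          * (PySem.Dict.counter ((((((s.toList.filter (· ≠ '*')).filter (· ≠ 'X')).filter
              (· ≠ 'U')).filter (· ≠ 'B')).filter (· ≠ 'Z')).filter (· ≠ 'J'))).getD aa 0)).sum
        = (s.toList.map fb).sum := by
    intro ch fb hfb
    rw [pv_A_entry]
    have inv : ∀ (c : Char), pvChemiStats.contains c = false →
        ∀ (l : List Char), ((l.filter (· ≠ c)).map (pvHA ch)).sum = (l.map (pvHA ch)).sum := by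
      intro c hc l
      apply pv_sum_filter_inv
      intro x hx
      have : x = c := by simpa using hx
      subst this
      simp [pvHA, hc]
    rw [inv 'J' (by rfl), inv 'Z' (by rfl), inv 'B' (by rfl), inv 'U' (by rfl),
        inv 'X' (by rfl), inv '*' (by rfl)]
    exact congrArg List.sum (List.map_congr_left fun x _ => hfb x)
  rw [key 'C' pvFB1 pv_pt1, key 'H' pvFB2 pv_pt2, key 'O' pvFB3 pv_pt3,
      key 'N' pvFB4 pv_pt4, key 'S' pvFB5 pv_pt5]
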